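-- pv_equiv track=rewrite | github.com/backendwiz/dsa-practice | binary-search/BS-On-Answers/9-book-alloc-prob.py | solve
-- ===== SOURCE A (Python) =====
-- def solve(arr, m):
--
--     n = len(arr)
--     if m > n:
--         return -1
--
--     low, high = max(arr), sum(arr)
--
--     while low <= high:
--         mid = (low + high) // 2
--         students = countStudents(arr, mid)
--         if students > m:
--             low = mid + 1
--         else:
--             high = mid - 1
--     return low
--
-- def countStudents(arr, pages):
--     n = len(arr)
--     students = 1
--     pagesStudents = 0
--     for i in range(n):
--         if pagesStudents + arr[i] <= pages:
--             pagesStudents += arr[i]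
--         else:
--             students += 1
--             pagesStudents = arr[i]
--     return students
-- ===== SOURCE B (Python) =====
-- def solve(arr, m):
--     if m > len(arr):
--         return -1
--     biggest = arr[0]
--     total = 0
--     for a in arr:
--         if a > biggest:
--             biggest = a
--         total += a
--     return search(arr, m, biggest, total)
--
--
-- def search(arr, m, low, high):
--     if low > high:
--         return low
--     mid = (low + high) // 2
--     if feasible(arr, m, mid):
--         return search(arr, m, low, mid - 1)
--     return search(arr, m, mid + 1, high)
--
--
-- def feasible(arr, m, pages):
--     students = 1
--     load = 0
--     for a in arr:
--         if load + a <= pages: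
--             load += a
--         else:
--             students += 1
--             load = a
--     return students <= m
-- ===== Notes on version B (the rewrite author's own statement) =====
-- stated objective: alternative
-- what changed: B recomputes the same answer with a different decomposition: a recursive binary search helper instead of A's while-loop, a boolean feasibility helper that folds directly over the book list instead of A's indexed countStudents loop, and the low/high bounds (max and sum) computed in one fused pass instead of two builtin calls; the probe trajectory itself must be kept because the greedy feasibility predicate is not monotone for negative page counts, so any other search order would change the result inside the domain.
import Mathlib
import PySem

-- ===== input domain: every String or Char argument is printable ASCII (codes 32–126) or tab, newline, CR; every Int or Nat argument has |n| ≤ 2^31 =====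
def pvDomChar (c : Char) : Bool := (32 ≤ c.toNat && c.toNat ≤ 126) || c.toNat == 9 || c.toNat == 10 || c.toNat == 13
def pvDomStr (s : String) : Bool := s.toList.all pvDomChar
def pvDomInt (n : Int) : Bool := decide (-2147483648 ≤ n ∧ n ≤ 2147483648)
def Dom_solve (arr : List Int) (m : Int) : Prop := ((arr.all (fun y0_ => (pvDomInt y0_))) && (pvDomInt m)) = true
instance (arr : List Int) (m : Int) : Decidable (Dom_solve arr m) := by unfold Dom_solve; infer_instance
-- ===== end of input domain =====

-- B replaces A's while-loop binary search by a recursive search with a boolean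
-- feasibility helper folding directly over the books, and computes the max/sum
-- bounds in one fused pass; same probe trajectory, objective: alternative decomposition.

-- ===== PORT A =====
-- countStudents: indexed for-loop over range(n) with two accumulators
def countStudents (arr : List Int) (pages : Int) : Int :=
  let n : Int := arr.length
  let st := (PySem.List.pyRange 0 n 1).foldl
    (fun (st : Int × Int) i =>
      let a := PySem.List.pyGetD arr i 0   -- 0 ≤ i < n, so in range (no IndexError)
      if st.2 + a ≤ pages then (st.1, st.2 + a) else (st.1 + 1, a))
    (1, 0)
  st.1

-- the while low <= high loop of A, state (low, high)
def solveLoop (arr : List Int) (m : Int) (low high : Int) : Int :=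
  if h : low ≤ high then
    let mid := PySem.Int.floordiv (low + high) 2
    if countStudents arr mid > m then
      solveLoop arr m (mid + 1) high
    else
      solveLoop arr m low (mid - 1)
  else low
termination_by (high + 1 - low).toNat
decreasing_by
  · obtain ⟨h1, h2⟩ := PySem.Int.floordiv_two_mid_bounds h; omega
  · obtain ⟨h1, h2⟩ := PySem.Int.floordiv_two_mid_bounds h; omega

def solve (arr : List Int) (m : Int) : Int :=
  let n : Int := arr.length
  if m > n then -1
  else
    -- max(arr) raises ValueError on []; Pre_solve excludes reaching it empty
    let low := (PySem.List.max? arr (fun y => y)).getD 0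
    let high := arr.sum
    solveLoop arr m low high

-- ===== PORT B =====
def feasible (arr : List Int) (m : Int) (pages : Int) : Bool :=
  let st := arr.foldl
    (fun (st : Int × Int) a =>
      if st.2 + a ≤ pages then (st.1, st.2 + a) else (st.1 + 1, a))
    (1, 0)
  decide (st.1 ≤ m)

def search (arr : List Int) (m : Int) (low high : Int) : Int :=
  if h : low > high then low
  else
    let mid := PySem.Int.floordiv (low + high) 2
    if feasible arr m mid then search arr m low (mid - 1)
    else search arr m (mid + 1) high
termination_by (high + 1 - low).toNat
decreasing_by
  · obtain ⟨h1, h2⟩ := PySem.Int.floordiv_two_mid_bounds (by omega : low ≤ high); omega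
  · obtain ⟨h1, h2⟩ := PySem.Int.floordiv_two_mid_bounds (by omega : low ≤ high); omega

def solve_alt (arr : List Int) (m : Int) : Int :=
  if m > (arr.length : Int) then -1
  else
    -- arr[0] raises IndexError on []; Pre_solve excludes reaching it empty
    let st := arr.foldl
      (fun (st : Int × Int) a => ((if a > st.1 then a else st.1), st.2 + a))
      ((PySem.List.pyGet? arr 0).getD 0, 0)
    search arr m st.1 st.2

-- ===== PRECONDITION & SPEC =====
-- Pre_ excludes only the inputs where A raises: arr = [] with m ≤ 0
-- (max([]) is a ValueError; B's arr[0] is an IndexError there too).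
def Pre_solve (arr : List Int) (m : Int) : Prop := arr = [] → 0 < m
instance (arr : List Int) (m : Int) : Decidable (Pre_solve arr m) := by unfold Pre_solve; infer_instance
def pvWitness_solve : List Int × Int := ([12, 34, 67, 90], 2)
def Spec_solve (arr : List Int) (m : Int) (out : Int) : Prop := out = solve_alt arr m
instance (arr : List Int) (m : Int) (out : Int) : Decidable (Spec_solve arr m out) := by unfold Spec_solve; infer_instance

-- ===== CLAIM (what is proved, stated in full; the proofs are below) =====
def Claim_equal_solve : Prop := ∀ (arr : List Int) (m : Int), Dom_solve arr m → Pre_solve arr m → Spec_solve arr m (solve arr m)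

-- ===== LEMMAS AND PROOFS =====

-- A's indexed count loop equals B's direct fold over the elements
theorem countStudents_eq_fold (arr : List Int) (pages : Int) :
    countStudents arr pages =
      (arr.foldl (fun (st : Int × Int) a =>
        if st.2 + a ≤ pages then (st.1, st.2 + a) else (st.1 + 1, a)) (1, 0)).1 := by
  unfold countStudents
  refine congrArg Prod.fst ?_
  exact PySem.List.foldl_pyRange_zero_pyGetD' arr 0
    (fun (st : Int × Int) a => if st.2 + a ≤ pages then (st.1, st.2 + a) else (st.1 + 1, a)) (1, 0)

theorem feasible_iff (arr : List Int) (m pages : Int) :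
    feasible arr m pages = decide (countStudents arr pages ≤ m) := by
  rw [countStudents_eq_fold]; rfl

-- the two searches follow the same trajectory
theorem loop_eq (arr : List Int) (m : Int) :
    ∀ (N : Nat) (low high : Int), (high + 1 - low).toNat ≤ N →
      solveLoop arr m low high = search arr m low high := by
  intro N
  induction N with
  | zero =>
    intro low high hN
    rw [solveLoop, search]
    have : ¬ low ≤ high := by omega
    simp [this, show low > high by omega]
  | succ n ih =>
    intro low high hN
    rw [solveLoop, search]
    by_cases h : low ≤ high
    · obtain ⟨h1, h2⟩ := PySem.Int.floordiv_two_mid_bounds h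
      simp only [h, dite_true, show ¬ low > high by omega, dite_false, feasible_iff]
      by_cases hc : countStudents arr (PySem.Int.floordiv (low + high) 2) > m
      · simp only [hc, if_true, show ¬ countStudents arr (PySem.Int.floordiv (low + high) 2) ≤ m by omega,
          decide_false, Bool.false_eq_true, if_false]
        exact ih _ _ (by omega)
      · simp only [hc, if_false, show countStudents arr (PySem.Int.floordiv (low + high) 2) ≤ m by omega,
          decide_true, if_true]
        exact ih _ _ (by omega)
    · simp [h, show low > high by omega]

-- B's fused bounds pass computes (max, sum)
theorem bounds_fold (x : Int) (xs : List Int) :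
    (x :: xs).foldl (fun (st : Int × Int) a => ((if a > st.1 then a else st.1), st.2 + a)) (x, 0) =
      (((PySem.List.max? (x :: xs) (fun y => y)).getD 0), (x :: xs).sum) := by
  rw [PySem.List.foldl_prod_mk (f := fun b a => if a > b then a else b) (g := fun s a => s + a)]
  rw [PySem.List.max?_id_cons]
  have hmax : ∀ (l : List Int) (b : Int), l.foldl (fun b a => if a > b then a else b) b = l.foldl max b := by
    intro l
    induction l with
    | nil => intro b; rfl
    | cons y t iht => intro b; simp only [List.foldl_cons]; rw [iht]; congr 1; omega
  have hsum : ∀ (l : List Int) (s : Int), l.foldl (fun s a => s + a) s = s + l.sum := by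
    intro l
    induction l with
    | nil => intro s; simp
    | cons y t iht => intro s; simp only [List.foldl_cons, List.sum_cons]; rw [iht]; ring
  rw [hmax, hsum]
  simp only [Option.getD_some, List.foldl_cons, zero_add]
  congr 1
  simp [max_self]

theorem solve_eq (arr : List Int) (m : Int) (hpre : Pre_solve arr m) :
    solve arr m = solve_alt arr m := by
  unfold solve solve_alt
  by_cases hg : m > (arr.length : Int)
  · simp [hg]
  · simp only [hg, if_false]
    match arr with
    | [] =>
      exfalso
      have := hpre rfl
      simp at hg
      omega
    | x :: xs =>
      have h0 : (PySem.List.pyGet? (x :: xs) 0).getD 0 = x := by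
        simp [PySem.List.pyGet?, PySem.List.pyIdx?]
      rw [h0, bounds_fold]
      exact loop_eq (x :: xs) m _ _ _ (le_refl _)

-- ===== VERDICT (by name: the statement is the Claim_ definition above) =====
theorem solve_spec : Claim_equal_solve := by
  intro arr m _ hpre
  unfold Spec_solve
  exact solve_eq arr m hpre
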